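-- pv_equiv track=rewrite | github.com/meghanvoneill/Russian_Troll_Tweets | russian-troll-tweets-master/cursory_data_manipulation.py | k_gram_strings
-- ===== SOURCE A (Python) =====
-- def k_gram_strings(contents, k):
--
--     k_grams = []
--
--     contents_string_list = contents.split(" ")
--     contents_string_list = list(filter(None, contents_string_list))
--
--     for index in range(0, len(contents_string_list) - k + 1):
--         new_k_gram = " ".join(contents_string_list[index:index + k])
--         k_grams.append(new_k_gram)
--
--     return set(k_grams)
-- ===== SOURCE B (Python) =====
-- def k_gram_strings(contents, k):
--     words = list(filter(None, contents.split(" ")))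
--     if k == 0:
--         return {""}  # exactly one shingle of length zero: the empty one
--     if k > len(words):
--         return set()  # no window of k words fits
--     return {" ".join(t) for t in zip(*(words[i:] for i in range(k)))}
-- ===== Notes on version B (the rewrite author's own statement) =====
-- stated objective: idiomatic
-- what changed: B forms the shingles by zipping the k shifted copies of the word list in lockstep (a set comprehension over zip(*(words[i:] for i in range(k))), with trivial early returns when k == 0 or no k-word window fits) instead of A's index loop that slices words[i:i+k] at each step; for k < 0 B returns the empty set rather than reproducing A's wrapped-slice accident.
-- intended difference: For k < 0 A's slice words[i:i+k] wraps to count from the end of the list, so A returns an accidental set mixing '' with truncated grams (e.g. {'', 'a'} on ('a b', -1)); B returns the empty set, the intended value since no shingle of negative length exists. — e.g. on k_gram_strings("a b", -1): A returns ["a", ""], B returns []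
import Mathlib
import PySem

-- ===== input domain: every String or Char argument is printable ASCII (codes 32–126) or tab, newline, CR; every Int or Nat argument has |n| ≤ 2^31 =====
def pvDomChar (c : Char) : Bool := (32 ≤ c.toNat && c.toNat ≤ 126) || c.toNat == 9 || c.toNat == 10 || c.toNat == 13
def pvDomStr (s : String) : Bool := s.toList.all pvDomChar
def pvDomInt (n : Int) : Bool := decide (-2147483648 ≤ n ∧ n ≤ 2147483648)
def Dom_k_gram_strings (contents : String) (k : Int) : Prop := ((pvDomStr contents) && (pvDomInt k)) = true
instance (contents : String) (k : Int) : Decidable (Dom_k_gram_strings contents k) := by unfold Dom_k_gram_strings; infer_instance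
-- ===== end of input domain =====

-- B builds the shingle set by zipping the k shifted copies of the word list in lockstep (after the
-- two trivial no-window cases) instead of A's index loop over slices (objective: idiomatic); for
-- k < 0 B returns the empty set where A's wrapped negative slice returns an accidental set (the
-- intended difference D_ below).


-- ===== PORT A =====
def k_gram_strings (contents : String) (k : Int) : List String :=
  let k_grams : List String := []
  -- contents.split(" "): sep = " " ≠ "", so split? is always `some`; getD only unwraps it
  let contents_string_list := (PySem.Str.split? contents " ").getD []
  -- list(filter(None, contents_string_list)): drops the empty strings
  let contents_string_list := contents_string_list.filter (fun w => decide (w ≠ ""))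
  let k_grams := (PySem.List.pyRange 0 ((contents_string_list.length : Int) - k + 1) 1).foldl
    (fun acc index =>
      acc ++ [PySem.Str.join " " (PySem.List.slice contents_string_list (some index) (some (index + k)))])
    k_grams
  PySem.Set.ofList k_grams

-- ===== PORT B =====
-- zip(*cols) consumed by the set comprehension: join the heads, recurse on the tails, stop as soon
-- as one column is exhausted (or there are no columns at all, Python's zip()); the fuel argument
-- only bounds the recursion and is never reached before a column empties.
def pvZipJoin : Nat → List (List String) → List String
  | 0, _ => []
  | _ + 1, [] => []
  | fuel + 1, c :: cs =>
    match (c :: cs).mapM List.head? with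
    | none => []
    | some heads => PySem.Str.join " " heads :: pvZipJoin fuel ((c :: cs).map List.tail)

def k_gram_strings_alt (contents : String) (k : Int) : List String :=
  let words := ((PySem.Str.split? contents " ").getD []).filter (fun w => decide (w ≠ ""))
  if k = 0 then [""]  -- exactly one shingle of length zero: the empty one
  else if (words.length : Int) < k then []  -- no window of k words fits
  else PySem.Set.ofList
    (pvZipJoin (words.length + 1) ((List.range k.toNat).map (fun i => words.drop i)))

-- ===== PRECONDITION & SPEC =====
-- For k < 0, A's slice words[i:i+k] wraps to count from the end of the list, so A returns an
-- accidental set mixing '' with truncated grams (e.g. {'', 'a'} on ('a b', -1)); B returns the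
-- empty set, the intended value since no shingle of negative length exists.
def D_k_gram_strings (contents : String) (k : Int) : Prop := k < 0
instance (contents : String) (k : Int) : Decidable (D_k_gram_strings contents k) := by unfold D_k_gram_strings; infer_instance

def Spec_k_gram_strings (contents : String) (k : Int) (out : List String) : Prop := ¬ D_k_gram_strings contents k → out = k_gram_strings_alt contents k
instance (contents : String) (k : Int) (out : List String) : Decidable (Spec_k_gram_strings contents k out) := by unfold Spec_k_gram_strings; infer_instance

def pvDiffWitness_k_gram_strings : String × Int := ("a b", -1)
def pvDiffWitnessOut_k_gram_strings : (List String) × (List String) := (["a", ""], [])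

-- ===== CLAIM (what is proved, stated in full; the proofs are below) =====
def Claim_unchanged_k_gram_strings : Prop := ∀ (contents : String) (k : Int), Dom_k_gram_strings contents k → Spec_k_gram_strings contents k (k_gram_strings contents k)
def Claim_changed_k_gram_strings : Prop := Dom_k_gram_strings (pvDiffWitness_k_gram_strings.1) (pvDiffWitness_k_gram_strings.2) ∧ D_k_gram_strings (pvDiffWitness_k_gram_strings.1) (pvDiffWitness_k_gram_strings.2) ∧ k_gram_strings (pvDiffWitness_k_gram_strings.1) (pvDiffWitness_k_gram_strings.2) = pvDiffWitnessOut_k_gram_strings.1 ∧ k_gram_strings_alt (pvDiffWitness_k_gram_strings.1) (pvDiffWitness_k_gram_strings.2) = pvDiffWitnessOut_k_gram_strings.2 ∧ pvDiffWitnessOut_k_gram_strings.1 ≠ pvDiffWitnessOut_k_gram_strings.2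
def Claim_exact_k_gram_strings : Prop := ∀ (contents : String) (k : Int), Dom_k_gram_strings contents k → D_k_gram_strings contents k → k_gram_strings contents k ≠ k_gram_strings_alt contents k

-- ===== LEMMAS AND PROOFS =====

-- the shared tokenisation (proof-side abbreviation of the two ports' word lists)
def pvW (contents : String) : List String :=
  ((PySem.Str.split? contents " ").getD []).filter (fun w => decide (w ≠ ""))

-- A's loop, flattened to a map over range
theorem pvA_eq (contents : String) (k : Int) :
    k_gram_strings contents k =
      PySem.Set.ofList ((List.range (((pvW contents).length : Int) - k + 1).toNat).map
        (fun (j : Nat) => PySem.Str.join " "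
          (PySem.List.slice (pvW contents) (some (j : Int)) (some ((j : Int) + k))))) := by
  simp only [k_gram_strings]
  rw [PySem.List.foldl_append_singleton_eq_map, PySem.List.pyRange_one]
  simp [pvW, List.map_map, Function.comp_def]

theorem pvB_eq (contents : String) (k : Int) (hk : k ≠ 0)
    (hle : ¬ (((pvW contents).length : Int) < k)) :
    k_gram_strings_alt contents k =
      PySem.Set.ofList (pvZipJoin ((pvW contents).length + 1)
        ((List.range k.toNat).map (fun i => (pvW contents).drop i))) := by
  simp [k_gram_strings_alt, pvW] at hle ⊢
  simp [hk, hle]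

theorem pvB_big (contents : String) (k : Int) (hk : k ≠ 0)
    (hgt : ((pvW contents).length : Int) < k) :
    k_gram_strings_alt contents k = [] := by
  simp [k_gram_strings_alt, pvW] at hgt ⊢
  simp [hk, hgt]

-- pvZipJoin's two unfoldings on positive fuel, phrased by the value of the heads
theorem pvZipJoin_nil (fuel : Nat) : pvZipJoin fuel [] = [] := by
  cases fuel <;> rfl

theorem pvZipJoin_none (fuel : Nat) (cols : List (List String))
    (h : cols.mapM List.head? = none) : pvZipJoin (fuel + 1) cols = [] := by
  cases cols with
  | nil => rfl
  | cons c cs => simp [pvZipJoin, h]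

theorem pvZipJoin_some (fuel : Nat) (cols : List (List String)) (heads : List String)
    (hne : cols ≠ []) (h : cols.mapM List.head? = some heads) :
    pvZipJoin (fuel + 1) cols =
      PySem.Str.join " " heads :: pvZipJoin fuel (cols.map List.tail) := by
  cases cols with
  | nil => exact absurd rfl hne
  | cons c cs => simp [pvZipJoin, h]

-- the heads of the k shifted copies of l are l's first k elements (when they exist)
theorem pvHeads (l : List String) (K : Nat) :
    ((List.range K).map (fun i => l.drop i)).mapM List.head? =
      if K ≤ l.length then some (l.take K) else none := by
  induction K with
  | zero => simp
  | succ K ih =>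
    rw [List.range_succ, List.map_append, List.mapM_append, ih]
    by_cases h : K + 1 ≤ l.length
    · have hK : K ≤ l.length := by omega
      have hlt : K < l.length := by omega
      rw [if_pos hK, if_pos h]
      simp only [List.map_cons, List.map_nil, List.mapM_cons, List.mapM_nil]
      rw [List.head?_drop, List.getElem?_eq_getElem hlt, List.take_add_one,
        List.getElem?_eq_getElem hlt]
      rfl
    · by_cases h' : K ≤ l.length
      · have he : K = l.length := by omega
        rw [if_pos h', if_neg h]
        simp [he]
      · rw [if_neg h', if_neg h]
        simp

-- taking the tails of the shifted copies shifts once more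
theorem pvTails (l : List String) (K : Nat) :
    (((List.range K).map (fun i => l.drop i)).map List.tail) =
      (List.range K).map (fun i => l.tail.drop i) := by
  simp [List.map_map, Function.comp_def, List.tail_drop, List.drop_tail]

-- the zip of the K shifted copies of ws, joined, is the list of K-word windows of ws
theorem pvZip_windows (ws : List String) (fuel K : Nat) (hK : 1 ≤ K) (hfuel : ws.length < fuel) :
    pvZipJoin fuel ((List.range K).map (fun i => ws.drop i)) =
      (List.range (ws.length + 1 - K)).map
        (fun j => PySem.Str.join " " ((ws.drop j).take K)) := by
  induction ws generalizing fuel with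
  | nil =>
    obtain ⟨f, rfl⟩ : ∃ f, fuel = f + 1 := ⟨fuel - 1, by omega⟩
    obtain ⟨K', rfl⟩ : ∃ K', K = K' + 1 := ⟨K - 1, by omega⟩
    rw [List.range_succ_eq_map]
    simp [pvZipJoin]
  | cons w ws ih =>
    obtain ⟨f, rfl⟩ : ∃ f, fuel = f + 1 := ⟨fuel - 1, by omega⟩
    have hne : ((List.range K).map (fun i => (w :: ws).drop i)) ≠ [] := by
      simp; omega
    by_cases h : K ≤ (w :: ws).length
    · have hh : ((List.range K).map (fun i => (w :: ws).drop i)).mapM List.head?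
          = some ((w :: ws).take K) := by
        rw [pvHeads, if_pos h]
      rw [pvZipJoin_some f _ _ hne hh, pvTails]
      simp only [List.tail_cons]
      have hlen : ws.length < f := by
        simp only [List.length_cons] at hfuel; omega
      rw [ih f hlen]
      have hM : (w :: ws).length + 1 - K = (ws.length + 1 - K) + 1 := by
        simp only [List.length_cons] at h ⊢; omega
      rw [hM, List.range_succ_eq_map, List.map_cons, List.map_map]
      refine congrArg₂ List.cons (by simp) ?_
      apply List.map_congr_left
      intro j _
      simp [Function.comp_def, Nat.succ_eq_add_one, List.drop_succ_cons]
    · have hh : ((List.range K).map (fun i => (w :: ws).drop i)).mapM List.head?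
          = (none : Option (List String)) := by
        rw [pvHeads, if_neg h]
      rw [pvZipJoin_none f _ hh]
      have hM : (w :: ws).length + 1 - K = 0 := by
        simp only [List.length_cons] at h ⊢; omega
      rw [hM]
      simp

-- a nonempty constant list collapses to a singleton set
theorem pvDiscard_replicate (m : Nat) (a : String) :
    (PySem.Set.ofList (List.replicate m a)).discard a = [] := by
  induction m with
  | zero => simp [PySem.Set.ofList, PySem.Set.discard]
  | succ m ih =>
    rw [List.replicate_succ, PySem.Set.ofList_cons]
    simpa [PySem.Set.discard] using congrArg (fun s => PySem.Set.discard s a) ih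

theorem pvOfList_replicate (m : Nat) (a : String) :
    PySem.Set.ofList (List.replicate (m + 1) a) = [a] := by
  rw [List.replicate_succ, PySem.Set.ofList_cons, pvDiscard_replicate]

-- k = 0: every window is empty, and there is at least one, so A returns {""}
theorem pvA_zero (contents : String) : k_gram_strings contents 0 = [""] := by
  rw [pvA_eq]
  have hsl : ∀ j : Nat, PySem.List.slice (pvW contents) (some (j : Int)) (some ((j : Int) + 0)) =
      ([] : List String) := by
    intro j
    simpa using PySem.List.slice_natCast_add (pvW contents) j 0
  have hmap : (List.range ((((pvW contents).length : Int)) - 0 + 1).toNat).map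
      (fun (j : Nat) => PySem.Str.join " "
        (PySem.List.slice (pvW contents) (some (j : Int)) (some ((j : Int) + 0)))) =
      List.replicate ((pvW contents).length + 1) (PySem.Str.join " " []) := by
    rw [List.eq_replicate_iff]
    refine ⟨by simp only [List.length_map, List.length_range]; omega, ?_⟩
    intro b hb
    obtain ⟨j, _, rfl⟩ := List.mem_map.mp hb
    rw [hsl j]
  rw [hmap]
  have hj : PySem.Str.join " " ([] : List String) = "" := by decide
  rw [hj, pvOfList_replicate]

-- k ≥ 1: A's sliced windows are B's zipped windows
theorem pvA_pos (contents : String) (k : Int) (hk : 0 < k) :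
    k_gram_strings contents k = k_gram_strings_alt contents k := by
  obtain ⟨K, rfl⟩ : ∃ K : Nat, k = (K : Int) := ⟨k.toNat, by omega⟩
  have hK : 1 ≤ K := by exact_mod_cast hk
  by_cases hbig : ((pvW contents).length : Int) < (K : Int)
  · rw [pvA_eq, pvB_big contents (K : Int) (by omega) hbig]
    have h0 : (((pvW contents).length : Int) - (K : Int) + 1).toNat = 0 := by omega
    rw [h0]
    simp [PySem.Set.ofList]
  · rw [pvA_eq, pvB_eq contents (K : Int) (by omega) hbig]
    simp only [Int.toNat_natCast]
    rw [pvZip_windows (pvW contents) ((pvW contents).length + 1) K hK (by omega)]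
    congr 1
    have h1 : (((pvW contents).length : Int) - (K : Int) + 1).toNat
        = (pvW contents).length + 1 - K := by omega
    rw [h1]
    apply List.map_congr_left
    intro j _
    rw [PySem.List.slice_natCast_add]

-- k < 0: B's result is the empty set …
theorem pvB_neg (contents : String) (k : Int) (hk : k < 0) :
    k_gram_strings_alt contents k = [] := by
  have h0 : k.toNat = 0 := by omega
  have hle : ¬ (((pvW contents).length : Int) < k) := by
    have : (0 : Int) ≤ ((pvW contents).length : Int) := by positivity
    omega
  rw [pvB_eq contents k (by omega) hle, h0]
  simp [pvZipJoin_nil, PySem.Set.ofList]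

-- … while A's is nonempty
theorem pvA_ne_nil (contents : String) (k : Int) (hk : k < 0) :
    k_gram_strings contents k ≠ [] := by
  rw [pvA_eq]
  obtain ⟨M, hM⟩ : ∃ M : Nat, (((pvW contents).length : Int) - k + 1).toNat = M + 1 :=
    ⟨(((pvW contents).length : Int) - k + 1).toNat - 1, by omega⟩
  rw [hM, List.range_succ_eq_map, List.map_cons, PySem.Set.ofList_cons]
  exact List.cons_ne_nil _ _

-- ===== VERDICT (by name: the statement is the Claim_ definition above) =====
theorem k_gram_strings_spec : Claim_unchanged_k_gram_strings := by
  intro contents k _ hD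
  have hk : 0 ≤ k := by
    unfold D_k_gram_strings at hD; omega
  rcases lt_or_eq_of_le hk with h | h
  · exact pvA_pos contents k h
  · rw [← h, pvA_zero]
    simp [k_gram_strings_alt]

theorem k_gram_strings_changed : Claim_changed_k_gram_strings := by
  unfold Claim_changed_k_gram_strings; decide

theorem k_gram_strings_tight : Claim_exact_k_gram_strings := by
  intro contents k _ hD
  have hk : k < 0 := hD
  rw [pvB_neg contents k hk]
  exact pvA_ne_nil contents k hk
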